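-- pv_equiv track=rewrite | github.com/bojone/CLUE-bert4keras | chid.py | sample_split
-- ===== SOURCE A (Python) =====
-- maxlen = 64
--
-- def sample_split(texts, answers, candidates):
--     """将样本分隔为只有一个答案的样本，并截断长度
--     """
--     results = []
--     for i, a in enumerate(answers):
--         texts_a, texts_b = texts[:i + 1], texts[i + 1:]
--         offset = 3 + 4 + 1 + 4 * (len(texts_a) + len(texts_b) - 2)
--         while True:
--             l_a = sum([len(t) for t in texts_a])
--             l_b = sum([len(t) for t in texts_b])
--             if l_a + l_b > maxlen - offset:
--                 if l_a > l_b: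
--                     if len(texts_a[0]) > 1:
--                         texts_a[0] = texts_a[0][1:]
--                     else:
--                         texts_a = texts_a[1:]
--                         offset -= 4
--                 else:
--                     if len(texts_b[-1]) > 1:
--                         texts_b[-1] = texts_b[-1][:-1]
--                     else:
--                         texts_b = texts_b[:-1]
--                         offset -= 4
--             else:
--                 break
--         results.append((texts_a, texts_b, a, candidates))
--     return results
-- ===== SOURCE B (Python) =====
-- maxlen = 64
--
-- def _trim(ta, rb, la, lb, budget):
--     """Bulk trimmer on (prefix pieces, REVERSED suffix pieces) with running totals."""
--     while la + lb > budget: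
--         if la > lb:
--             t = ta[0]
--             k = min(la + lb - budget, la - lb, len(t) - 1)
--             if k > 0:
--                 ta = [t[k:]] + ta[1:]
--                 la -= k
--             else:
--                 ta = ta[1:]
--                 la -= len(t)
--                 budget += 4
--         else:
--             t = rb[0]
--             k = min(la + lb - budget, lb - la + 1, len(t) - 1)
--             if k > 0:
--                 rb = [t[:len(t) - k]] + rb[1:]
--                 lb -= k
--             else:
--                 rb = rb[1:]
--                 lb -= len(t)
--                 budget += 4
--     return ta, rb
--
-- def _one_sample(texts, i, a, candidates):
--     ta = texts[:i + 1]
--     rb = texts[i + 1:][::-1]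
--     la = sum(len(t) for t in ta)
--     lb = sum(len(t) for t in rb)
--     budget = maxlen - 4 * len(texts)
--     ta, rb = _trim(ta, rb, la, lb, budget)
--     return ta, rb[::-1], a, candidates
--
-- def sample_split(texts, answers, candidates):
--     """One sample per answer; the suffix is kept reversed so every trim is at a
--     list head, with running length totals and bulk character removal."""
--     return [_one_sample(texts, i, a, candidates) for i, a in enumerate(answers)]
-- ===== Notes on version B (the rewrite author's own statement) =====
-- stated objective: faster
-- what changed: B builds each sample by a map with the suffix pieces kept reversed (all trimming happens at list heads), maintains running length totals and a precomputed budget, and removes up to min(need, imbalance, piece_len-1) characters in one bulk slice per pass instead of A's one-character-per-iteration trimming with a full re-sum of every piece length on each iteration.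
import Mathlib
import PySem

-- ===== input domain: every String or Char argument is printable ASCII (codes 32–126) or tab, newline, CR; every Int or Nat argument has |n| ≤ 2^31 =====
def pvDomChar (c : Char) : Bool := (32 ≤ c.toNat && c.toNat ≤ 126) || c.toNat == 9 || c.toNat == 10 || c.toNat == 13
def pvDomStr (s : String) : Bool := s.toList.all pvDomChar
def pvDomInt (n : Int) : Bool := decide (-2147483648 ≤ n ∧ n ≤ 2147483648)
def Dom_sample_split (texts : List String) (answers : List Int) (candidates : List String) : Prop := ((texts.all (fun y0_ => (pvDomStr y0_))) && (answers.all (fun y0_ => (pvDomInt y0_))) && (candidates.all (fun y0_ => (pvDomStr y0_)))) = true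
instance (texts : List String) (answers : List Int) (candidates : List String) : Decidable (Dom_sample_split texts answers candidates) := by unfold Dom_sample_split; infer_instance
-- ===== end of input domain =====

-- B keeps the suffix pieces reversed so all trimming is at list heads, keeps
-- running length totals, and trims characters in bulk (one slice per pass)
-- instead of A's one-char-per-pass trimming with a full re-sum of all piece
-- lengths on every pass; same return value as A wherever A returns (outside
-- Pre_ the Python A raises IndexError).

-- fuel bound for the fueled loops: each pass removes a char or a piece,
-- so (chars + pieces) passes always suffice; the fuel-0 branches are unreachable
def pvCharSum (xs : List String) : Nat := (xs.map (fun s => s.toList.length)).sum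
def pvMu (ta tb : List String) : Nat := pvCharSum ta + pvCharSum tb + ta.length + tb.length

-- ===== PORT A =====
-- sum([len(t) for t in xs])
def pvLenSum (xs : List String) : Int := (xs.map PySem.Str.len).sum

-- inner `while True` loop of A: per pass, re-sum all lengths, trim one char or drop one piece
def pvLoopA : Nat → List String → List String → Int → List String × List String
  | 0, ta, tb, _ => (ta, tb)                 -- unreachable: fuel = pvMu+1 suffices
  | fuel + 1, ta, tb, offset =>
    let l_a := pvLenSum ta
    let l_b := pvLenSum tb
    if l_a + l_b > 64 - offset then
      if l_a > l_b then
        match ta with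
        | [] => ([], tb)                     -- Python: IndexError (texts_a[0]); outside Pre_
        | t :: rest =>
          if PySem.Str.len t > 1 then
            pvLoopA fuel (PySem.Str.slice t (some 1) none :: rest) tb offset
          else
            pvLoopA fuel rest tb (offset - 4)
      else
        match tb.getLast? with
        | none => (ta, tb)                   -- Python: IndexError (texts_b[-1]); outside Pre_
        | some t =>
          if PySem.Str.len t > 1 then
            pvLoopA fuel ta (tb.dropLast ++ [PySem.Str.slice t none (some (-1))]) offset
          else
            pvLoopA fuel ta tb.dropLast (offset - 4)
    else (ta, tb)

def sample_split (texts : List String) (answers : List Int) (candidates : List String) : List (List String × List String × Int × List String) :=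
  (PySem.List.enumerate answers).foldl
    (fun results ia =>
      let texts_a := PySem.List.slice texts none (some (ia.1 + 1))
      let texts_b := PySem.List.slice texts (some (ia.1 + 1)) none
      let offset : Int := 3 + 4 + 1 + 4 * ((texts_a.length : Int) + (texts_b.length : Int) - 2)
      let p := pvLoopA (pvMu texts_a texts_b + 1) texts_a texts_b offset
      results ++ [(p.1, p.2, ia.2, candidates)]) []

-- ===== PORT B =====
-- sum(len(t) for t in xs), as a fold with a running total
def pvSumLen (xs : List String) : Int := xs.foldl (fun s t => s + PySem.Str.len t) 0

-- _trim: the suffix rb is REVERSED, so both trims act on a list head; running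
-- totals la/lb/budget; one bulk slice of min(need, imbalance, len-1) chars per pass
def pvTrim : Nat → List String → List String → Int → Int → Int → List String × List String
  | 0, ta, rb, _, _, _ => (ta, rb)           -- unreachable: pvFuel suffices
  | fuel + 1, ta, rb, la, lb, budget =>
    if la + lb > budget then
      if la > lb then
        match ta with
        | [] => ([], rb)                     -- Python: IndexError (ta[0]); outside Pre_
        | t :: rest =>
          let k := min (min (la + lb - budget) (la - lb)) (PySem.Str.len t - 1)
          if k > 0 then
            pvTrim fuel (PySem.Str.slice t (some k) none :: rest) rb (la - k) lb budget
          else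
            pvTrim fuel rest rb (la - PySem.Str.len t) lb (budget + 4)
      else
        match rb with
        | [] => (ta, [])                     -- Python: IndexError (rb[0]); outside Pre_
        | t :: rest =>
          let k := min (min (la + lb - budget) (lb - la + 1)) (PySem.Str.len t - 1)
          if k > 0 then
            pvTrim fuel ta (PySem.Str.slice t none (some (PySem.Str.len t - k)) :: rest) la (lb - k) budget
          else
            pvTrim fuel ta rest la (lb - PySem.Str.len t) (budget + 4)
    else (ta, rb)

def pvFuel (texts : List String) : Nat := pvCharSum texts + texts.length + 1

-- _one_sample
def pvOneSample (texts : List String) (i : Nat) (a : Int) (candidates : List String) : List String × List String × Int × List String :=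
  let ta := texts.take (i + 1)
  let rb := (texts.drop (i + 1)).reverse
  let la := pvSumLen ta
  let lb := pvSumLen rb
  let budget : Int := 64 - 4 * (texts.length : Int)
  let p := pvTrim (pvFuel texts) ta rb la lb budget
  (p.1, p.2.reverse, a, candidates)

def sample_split_alt (texts : List String) (answers : List Int) (candidates : List String) : List (List String × List String × Int × List String) :=
  answers.zipIdx.map (fun ai => pvOneSample texts ai.2 ai.1 candidates)

-- ===== PRECONDITION & SPEC =====
-- Pre_ excludes exactly the inputs on which Python A raises IndexError: those where,
-- for some answer index i, texts[:i+1] ends in at least 17 empty strings (the loop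
-- then empties texts_b completely and still indexes texts_b[-1]).
def Pre_sample_split (texts : List String) (answers : List Int) (candidates : List String) : Prop :=
  ∀ i < answers.length, ((texts.take (i + 1)).reverse.takeWhile (fun s => s == "")).length < 17
instance (texts : List String) (answers : List Int) (candidates : List String) : Decidable (Pre_sample_split texts answers candidates) := by unfold Pre_sample_split; infer_instance

def pvWitness_sample_split : List String × List Int × List String :=
  (["ab", "cde", ""], [0, 2], ["x", "y"])

def Spec_sample_split (texts : List String) (answers : List Int) (candidates : List String) (out : List (List String × List String × Int × List String)) : Prop := out = sample_split_alt texts answers candidates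
instance (texts : List String) (answers : List Int) (candidates : List String) (out : List (List String × List String × Int × List String)) : Decidable (Spec_sample_split texts answers candidates out) := by unfold Spec_sample_split; infer_instance

-- ===== CLAIM (what is proved, stated in full; the proofs are below) =====
def Claim_equal_sample_split : Prop := ∀ (texts : List String) (answers : List Int) (candidates : List String), Dom_sample_split texts answers candidates → Pre_sample_split texts answers candidates → Spec_sample_split texts answers candidates (sample_split texts answers candidates)

-- ===== LEMMAS AND PROOFS =====

theorem pvStrLen_eq (s : String) : PySem.Str.len s = (s.toList.length : Int) := by simp

theorem pvToList_slice_from (t : String) (k : Int) (h : 0 ≤ k) :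
    (PySem.Str.slice t (some k) none).toList = t.toList.drop k.toNat := by
  simp [PySem.Str.toList_slice, PySem.Chars.slice_eq_listSlice, PySem.List.slice_from _ h]

theorem pvToList_slice_to (t : String) (m : Int) (h : 0 ≤ m) :
    (PySem.Str.slice t none (some m)).toList = t.toList.take m.toNat := by
  simp [PySem.Str.toList_slice, PySem.Chars.slice_eq_listSlice, PySem.List.slice_to _ h]

theorem pvCharSum_cons (t : String) (xs : List String) :
    pvCharSum (t :: xs) = t.toList.length + pvCharSum xs := by
  simp [pvCharSum]

theorem pvCharSum_concat (xs : List String) (t : String) :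
    pvCharSum (xs ++ [t]) = pvCharSum xs + t.toList.length := by
  simp [pvCharSum]

theorem pvGetLast?_eq (tb : List String) (t : String) (h : tb.getLast? = some t) :
    tb = tb.dropLast ++ [t] := by
  obtain ⟨ys, rfl⟩ := List.getLast?_eq_some_iff.mp h
  simp

theorem pvMu_cons_lt (X t : String) (rest tb : List String)
    (h : X.toList.length < t.toList.length) : pvMu (X :: rest) tb < pvMu (t :: rest) tb := by
  have e1 : X.toList.length = X.length := by simp
  have e2 : t.toList.length = t.length := by simp
  simp [pvMu, pvCharSum_cons]
  omega

theorem pvMu_last_lt (X t : String) (ta tb : List String) (hg : tb.getLast? = some t)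
    (h : X.toList.length < t.toList.length) : pvMu ta (tb.dropLast ++ [X]) < pvMu ta tb := by
  have e1 : X.toList.length = X.length := by simp
  have e2 : t.toList.length = t.length := by simp
  conv_rhs => rw [pvGetLast?_eq tb t hg]
  simp [pvMu, pvCharSum_concat]
  omega

theorem pvMu_tail_lt (t : String) (rest tb : List String) :
    pvMu rest tb < pvMu (t :: rest) tb := by
  simp [pvMu, pvCharSum_cons]
  omega

theorem pvMu_dropLast_lt (ta tb : List String) (t : String) (hg : tb.getLast? = some t) :
    pvMu ta tb.dropLast < pvMu ta tb := by
  conv_rhs => rw [pvGetLast?_eq tb t hg]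
  simp [pvMu, pvCharSum_concat]
  omega

theorem pvLenSum_nil : pvLenSum [] = 0 := rfl

theorem pvLenSum_cons (t : String) (xs : List String) :
    pvLenSum (t :: xs) = PySem.Str.len t + pvLenSum xs := by simp [pvLenSum]

theorem pvLenSum_concat (xs : List String) (t : String) :
    pvLenSum (xs ++ [t]) = pvLenSum xs + PySem.Str.len t := by simp [pvLenSum]

theorem pvLenSum_reverse (xs : List String) : pvLenSum xs.reverse = pvLenSum xs := by
  simp [pvLenSum]

theorem pvSumLen_eq (xs : List String) : pvSumLen xs = pvLenSum xs := by
  have h : ∀ (acc : Int), xs.foldl (fun s t => s + PySem.Str.len t) acc = acc + pvLenSum xs := by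
    induction xs with
    | nil => intro acc; simp [pvLenSum]
    | cons t xs ih => intro acc; rw [List.foldl_cons, ih, pvLenSum_cons]; ring
  simpa using h 0

theorem pvLenSum_eq_charSum (xs : List String) : pvLenSum xs = (pvCharSum xs : Int) := by
  induction xs with
  | nil => simp [pvLenSum, pvCharSum]
  | cons t xs ih => rw [pvLenSum_cons, pvCharSum_cons, ih, pvStrLen_eq]; push_cast; ring

theorem pvLenSum_nonneg (xs : List String) : 0 ≤ pvLenSum xs := by
  rw [pvLenSum_eq_charSum]; positivity

theorem pvStrLen_slice_from (t : String) (k : Int) (h0 : 0 ≤ k) (h1 : k ≤ PySem.Str.len t) :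
    PySem.Str.len (PySem.Str.slice t (some k) none) = PySem.Str.len t - k := by
  rw [pvStrLen_eq, pvToList_slice_from t k h0, List.length_drop]
  rw [pvStrLen_eq] at h1 ⊢
  omega

theorem pvStrLen_slice_to (t : String) (m : Int) (h0 : 0 ≤ m) (h1 : m ≤ PySem.Str.len t) :
    PySem.Str.len (PySem.Str.slice t none (some m)) = m := by
  rw [pvStrLen_eq, pvToList_slice_to t m h0, List.length_take]
  rw [pvStrLen_eq] at h1
  omega

theorem pvStrLen_neg_one (t : String) (h : 1 ≤ PySem.Str.len t) :
    PySem.Str.len (PySem.Str.slice t none (some (-1))) = PySem.Str.len t - 1 := by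
  rw [pvStrLen_eq, PySem.Str.slice_to_neg_one, List.length_dropLast]
  rw [pvStrLen_eq] at h ⊢
  omega

theorem pvSlice_from_succ (t : String) (k : Int) (hk : 0 ≤ k) :
    PySem.Str.slice (PySem.Str.slice t (some 1) none) (some k) none
      = PySem.Str.slice t (some (k + 1)) none := by
  apply String.toList_inj.mp
  rw [pvToList_slice_from _ k hk, pvToList_slice_from t 1 (by norm_num),
    pvToList_slice_from t (k + 1) (by omega), List.drop_drop]
  congr 1
  omega

theorem pvSlice_to_comp (t : String) (m : Int) (h0 : 0 ≤ m) (h1 : m ≤ PySem.Str.len t - 1) :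
    PySem.Str.slice (PySem.Str.slice t none (some (-1))) none (some m)
      = PySem.Str.slice t none (some m) := by
  apply String.toList_inj.mp
  rw [pvToList_slice_to _ m h0, pvToList_slice_to t m h0, PySem.Str.slice_to_neg_one,
    List.dropLast_eq_take, List.take_take]
  congr 1
  rw [pvStrLen_eq] at h1
  omega

theorem pvSlice_neg_one_eq (t : String) (h : 1 ≤ PySem.Str.len t) :
    PySem.Str.slice t none (some (-1)) = PySem.Str.slice t none (some (PySem.Str.len t - 1)) := by
  apply String.toList_inj.mp
  rw [PySem.Str.slice_to_neg_one,
    pvToList_slice_to t (PySem.Str.len t - 1) (by rw [pvStrLen_eq] at h ⊢; omega),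
    List.dropLast_eq_take]
  congr 1
  rw [pvStrLen_eq] at h ⊢
  omega

-- the A-loop's value does not depend on the fuel, as long as the fuel exceeds pvMu
theorem pvLoopA_irrel : ∀ (N f g : Nat) (ta tb : List String) (offset : Int),
    pvMu ta tb < N → pvMu ta tb < f → pvMu ta tb < g →
    pvLoopA f ta tb offset = pvLoopA g ta tb offset := by
  intro N
  induction N with
  | zero => intro f g ta tb offset h; exact absurd h (Nat.not_lt_zero _)
  | succ N ih =>
    intro f g ta tb offset hmu hf hg
    match f, g with
    | 0, _ => exact absurd hf (Nat.not_lt_zero _)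
    | _ + 1, 0 => exact absurd hg (Nat.not_lt_zero _)
    | f + 1, g + 1 =>
      rw [pvLoopA.eq_def, pvLoopA.eq_def]
      by_cases hc : 64 - offset < pvLenSum ta + pvLenSum tb
      · simp only [gt_iff_lt, if_pos hc]
        by_cases hab : pvLenSum tb < pvLenSum ta
        · simp only [if_pos hab]
          cases ta with
          | nil => rfl
          | cons t rest =>
            by_cases hlen : 1 < PySem.Str.len t
            · simp only [if_pos hlen]
              have hdec : pvMu (PySem.Str.slice t (some 1) none :: rest) tb
                  < pvMu (t :: rest) tb := by
                apply pvMu_cons_lt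
                rw [pvToList_slice_from t 1 (by norm_num)]
                rw [pvStrLen_eq] at hlen
                simp only [List.length_drop]
                omega
              exact ih f g _ tb offset (by omega) (by omega) (by omega)
            · simp only [if_neg hlen]
              have hdec := pvMu_tail_lt t rest tb
              exact ih f g rest tb (offset - 4) (by omega) (by omega) (by omega)
        · simp only [if_neg hab]
          rcases hgl : tb.getLast? with _ | t
          · rfl
          · by_cases hlen : 1 < PySem.Str.len t
            · simp only [if_pos hlen]
              have hdec : pvMu ta (tb.dropLast ++ [PySem.Str.slice t none (some (-1))])
                  < pvMu ta tb := by
                apply pvMu_last_lt _ _ _ _ hgl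
                rw [PySem.Str.slice_to_neg_one]
                rw [pvStrLen_eq] at hlen
                simp only [List.length_dropLast]
                omega
              exact ih f g ta _ offset (by omega) (by omega) (by omega)
            · simp only [if_neg hlen]
              have hdec := pvMu_dropLast_lt ta tb t hgl
              exact ih f g ta tb.dropLast (offset - 4) (by omega) (by omega) (by omega)
      · simp only [gt_iff_lt, if_neg hc]

-- one char-step of A, texts_a side (trim texts_a[0] by one char)
theorem pvLoopA_step_a (f : Nat) (t : String) (rest tb : List String) (offset : Int)
    (hlen : 1 < PySem.Str.len t)
    (hdiff : pvLenSum tb < pvLenSum (t :: rest))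
    (hneed : 64 - offset < pvLenSum (t :: rest) + pvLenSum tb) :
    pvLoopA (f + 1) (t :: rest) tb offset
      = pvLoopA f (PySem.Str.slice t (some 1) none :: rest) tb offset := by
  rw [pvLoopA.eq_def]
  simp only [gt_iff_lt, if_pos hneed, if_pos hdiff, if_pos hlen]

-- one char-step of A, texts_b side (trim texts_b[-1] by one char)
theorem pvLoopA_step_b (f : Nat) (ta tb : List String) (t : String) (offset : Int)
    (hg : tb.getLast? = some t)
    (hlen : 1 < PySem.Str.len t)
    (hdiff : ¬ pvLenSum tb < pvLenSum ta)
    (hneed : 64 - offset < pvLenSum ta + pvLenSum tb) :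
    pvLoopA (f + 1) ta tb offset
      = pvLoopA f ta (tb.dropLast ++ [PySem.Str.slice t none (some (-1))]) offset := by
  rw [pvLoopA.eq_def]
  simp only [gt_iff_lt, if_pos hneed, if_neg hdiff, hg, if_pos hlen]

-- a bulk slice of k chars off texts_a[0] is k single char-steps of A
theorem pvLoopA_bulk_a : ∀ (k : Nat) (f : Nat) (t : String) (rest tb : List String) (offset : Int),
    pvMu (t :: rest) tb < f →
    0 < k → (k : Int) ≤ PySem.Str.len t - 1 →
    (k : Int) ≤ pvLenSum (t :: rest) - pvLenSum tb →
    (k : Int) ≤ pvLenSum (t :: rest) + pvLenSum tb - (64 - offset) →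
    pvLoopA f (t :: rest) tb offset
      = pvLoopA f (PySem.Str.slice t (some (k : Int)) none :: rest) tb offset := by
  intro k
  induction k with
  | zero => intro f t rest tb offset _ h0; exact absurd h0 (lt_irrefl 0)
  | succ k ih =>
    intro f t rest tb offset hmu _ hlen hdiff hneed
    match f with
    | 0 => exact absurd hmu (Nat.not_lt_zero _)
    | f + 1 =>
      have hk1 : ((k : Int) + 1) = ((k + 1 : Nat) : Int) := by push_cast; ring
      have hstep := pvLoopA_step_a f t rest tb offset (by push_cast at hlen; omega)
        (by have := hdiff; push_cast at this; omega)
        (by have := hneed; push_cast at this; omega)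
      have hdec : pvMu (PySem.Str.slice t (some 1) none :: rest) tb < pvMu (t :: rest) tb := by
        apply pvMu_cons_lt
        rw [pvToList_slice_from t 1 (by norm_num)]
        have := pvStrLen_eq t
        simp only [List.length_drop]
        push_cast at hlen
        omega
      have hbump : pvLoopA f (PySem.Str.slice t (some 1) none :: rest) tb offset
          = pvLoopA (f + 1) (PySem.Str.slice t (some 1) none :: rest) tb offset :=
        pvLoopA_irrel (pvMu (PySem.Str.slice t (some 1) none :: rest) tb + 1) f (f + 1)
          _ tb offset (Nat.lt_succ_self _) (by omega) (by omega)
      rw [hstep, hbump]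
      rcases Nat.eq_zero_or_pos k with hk0 | hkpos
      · subst hk0; norm_num
      · have hlen1 : PySem.Str.len (PySem.Str.slice t (some 1) none) = PySem.Str.len t - 1 :=
          pvStrLen_slice_from t 1 (by norm_num) (by push_cast at hlen; omega)
        have hsum : pvLenSum (PySem.Str.slice t (some 1) none :: rest) = pvLenSum (t :: rest) - 1 := by
          rw [pvLenSum_cons, pvLenSum_cons, hlen1]; ring
        rw [ih (f + 1) (PySem.Str.slice t (some 1) none) rest tb offset (by omega) hkpos
          (by rw [hlen1]; push_cast at hlen ⊢; omega)
          (by rw [hsum]; push_cast at hdiff ⊢; omega)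
          (by rw [hsum]; push_cast at hneed ⊢; omega)]
        rw [pvSlice_from_succ t k (by positivity), hk1]

-- a bulk slice of k chars off texts_b[-1] is k single char-steps of A
theorem pvLoopA_bulk_b : ∀ (k : Nat) (f : Nat) (ta tb : List String) (t : String) (offset : Int),
    pvMu ta tb < f →
    tb.getLast? = some t →
    0 < k → (k : Int) ≤ PySem.Str.len t - 1 →
    (k : Int) ≤ pvLenSum tb - pvLenSum ta + 1 →
    (k : Int) ≤ pvLenSum ta + pvLenSum tb - (64 - offset) →
    pvLoopA f ta tb offset
      = pvLoopA f ta (tb.dropLast ++ [PySem.Str.slice t none (some (PySem.Str.len t - (k : Int)))]) offset := by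
  intro k
  induction k with
  | zero => intro f ta tb t offset _ _ h0; exact absurd h0 (lt_irrefl 0)
  | succ k ih =>
    intro f ta tb t offset hmu hg _ hlen hdiff hneed
    match f with
    | 0 => exact absurd hmu (Nat.not_lt_zero _)
    | f + 1 =>
      have hsumtb : pvLenSum tb = pvLenSum tb.dropLast + PySem.Str.len t := by
        conv_lhs => rw [pvGetLast?_eq tb t hg]
        rw [pvLenSum_concat]
      have hstep := pvLoopA_step_b f ta tb t offset hg (by push_cast at hlen; omega)
        (by have := hdiff; push_cast at this; omega)
        (by have := hneed; push_cast at this; omega)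
      have hdec : pvMu ta (tb.dropLast ++ [PySem.Str.slice t none (some (-1))]) < pvMu ta tb := by
        apply pvMu_last_lt _ _ _ _ hg
        rw [PySem.Str.slice_to_neg_one]
        have := pvStrLen_eq t
        simp only [List.length_dropLast]
        push_cast at hlen
        omega
      have hbump : pvLoopA f ta (tb.dropLast ++ [PySem.Str.slice t none (some (-1))]) offset
          = pvLoopA (f + 1) ta (tb.dropLast ++ [PySem.Str.slice t none (some (-1))]) offset :=
        pvLoopA_irrel (pvMu ta (tb.dropLast ++ [PySem.Str.slice t none (some (-1))]) + 1) f (f + 1)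
          ta _ offset (Nat.lt_succ_self _) (by omega) (by omega)
      rw [hstep, hbump]
      rcases Nat.eq_zero_or_pos k with hk0 | hkpos
      · subst hk0
        rw [pvSlice_neg_one_eq t (by push_cast at hlen; omega)]
        norm_num
      · have hlen1 : PySem.Str.len (PySem.Str.slice t none (some (-1))) = PySem.Str.len t - 1 :=
          pvStrLen_neg_one t (by push_cast at hlen; omega)
        have hg1 : (tb.dropLast ++ [PySem.Str.slice t none (some (-1))]).getLast?
            = some (PySem.Str.slice t none (some (-1))) := List.getLast?_concat
        have hsum1 : pvLenSum (tb.dropLast ++ [PySem.Str.slice t none (some (-1))])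
            = pvLenSum tb - 1 := by
          rw [pvLenSum_concat, hlen1, hsumtb]; ring
        rw [ih (f + 1) ta (tb.dropLast ++ [PySem.Str.slice t none (some (-1))])
          (PySem.Str.slice t none (some (-1))) offset (by omega) hg1 hkpos
          (by rw [hlen1]; push_cast at hlen ⊢; omega)
          (by rw [hsum1]; push_cast at hdiff ⊢; omega)
          (by rw [hsum1]; push_cast at hneed ⊢; omega)]
        rw [List.dropLast_concat]
        have harg : PySem.Str.len (PySem.Str.slice t none (some (-1))) - (k : Int)
            = PySem.Str.len t - ((k + 1 : Nat) : Int) := by rw [hlen1]; push_cast; ring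
        rw [harg, pvSlice_to_comp t _ (by push_cast at hlen; omega) (by push_cast at hlen ⊢; omega)]

-- B's bulk trimmer on (ta, reversed rb) computes A's loop result (suffix reversed back)
theorem pvTrim_eq_aux : ∀ (N fA fB : Nat) (ta rb : List String) (la lb budget offset : Int),
    pvMu ta rb.reverse < N → pvMu ta rb.reverse < fA → pvMu ta rb.reverse < fB →
    la = pvLenSum ta → lb = pvLenSum rb → budget = 64 - offset →
    pvTrim fB ta rb la lb budget
      = ((pvLoopA fA ta rb.reverse offset).1, (pvLoopA fA ta rb.reverse offset).2.reverse) := by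
  intro N
  induction N with
  | zero => intro fA fB ta rb la lb budget offset h; exact absurd h (Nat.not_lt_zero _)
  | succ N ih =>
    intro fA fB ta rb la lb budget offset hmu hfA hfB hla hlb hb
    subst hla hlb hb
    match fB with
    | 0 => exact absurd hfB (Nat.not_lt_zero _)
    | fB + 1 =>
      have hrev : pvLenSum rb.reverse = pvLenSum rb := pvLenSum_reverse rb
      by_cases hc : 64 - offset < pvLenSum ta + pvLenSum rb
      case neg =>
        match fA with
        | 0 => exact absurd hfA (Nat.not_lt_zero _)
        | fA + 1 =>
          rw [pvTrim.eq_def, pvLoopA.eq_def]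
          simp only [gt_iff_lt, hrev, if_neg hc]
          simp
      case pos =>
        by_cases hab : pvLenSum rb < pvLenSum ta
        case pos =>
          cases ta with
          | nil => exact absurd (lt_of_le_of_lt (pvLenSum_nonneg rb) hab) (by simp [pvLenSum_nil])
          | cons t rest =>
            by_cases hk : (0:Int) < min (min (pvLenSum (t :: rest) + pvLenSum rb - (64 - offset))
                (pvLenSum (t :: rest) - pvLenSum rb)) (PySem.Str.len t - 1)
            case pos =>
              rw [pvTrim.eq_def]
              simp only [gt_iff_lt, if_pos hc, if_pos hab, if_pos hk]
              set K := min (min (pvLenSum (t :: rest) + pvLenSum rb - (64 - offset))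
                (pvLenSum (t :: rest) - pvLenSum rb)) (PySem.Str.len t - 1) with hKdef
              have hK1 : K ≤ PySem.Str.len t - 1 := min_le_right _ _
              have hK2 : K ≤ pvLenSum (t :: rest) + pvLenSum rb - (64 - offset) :=
                le_trans (min_le_left _ _) (min_le_left _ _)
              have hK3 : K ≤ pvLenSum (t :: rest) - pvLenSum rb :=
                le_trans (min_le_left _ _) (min_le_right _ _)
              have hlen' : PySem.Str.len (PySem.Str.slice t (some K) none) = PySem.Str.len t - K :=
                pvStrLen_slice_from t K hk.le (by omega)
              have hsum : pvLenSum (PySem.Str.slice t (some K) none :: rest)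
                  = pvLenSum (t :: rest) - K := by
                rw [pvLenSum_cons, pvLenSum_cons, hlen']; ring
              have hdec : pvMu (PySem.Str.slice t (some K) none :: rest) rb.reverse
                  < pvMu (t :: rest) rb.reverse := by
                apply pvMu_cons_lt
                rw [pvToList_slice_from t K hk.le, List.length_drop]
                have := pvStrLen_eq t
                omega
              rw [ih fA fB (PySem.Str.slice t (some K) none :: rest) rb _ _ _ offset
                (by omega) (by omega) (by omega) hsum.symm rfl rfl]
              have hKn : ((K.toNat : Nat) : Int) = K := Int.toNat_of_nonneg hk.le
              rw [← hKn]
              rw [← pvLoopA_bulk_a K.toNat fA t rest rb.reverse offset (by omega) (by omega)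
                (by rw [hKn]; omega) (by rw [hKn, hrev]; omega) (by rw [hKn, hrev]; omega)]
            case neg =>
              have h1 : (1:Int) ≤ min (pvLenSum (t :: rest) + pvLenSum rb - (64 - offset))
                  (pvLenSum (t :: rest) - pvLenSum rb) := le_min (by omega) (by omega)
              have hlen1 : PySem.Str.len t ≤ 1 := by
                by_contra hgt
                exact hk (lt_of_lt_of_le Int.zero_lt_one (le_min h1 (by omega)))
              rw [pvTrim.eq_def]
              simp only [gt_iff_lt, if_pos hc, if_pos hab, if_neg hk]
              have hdec := pvMu_tail_lt t rest rb.reverse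
              rw [ih fA fB rest rb _ _ _ (offset - 4) (by omega) (by omega) (by omega)
                (by rw [pvLenSum_cons]; ring) rfl (by ring)]
              match fA with
              | 0 => exact absurd hfA (Nat.not_lt_zero _)
              | fA + 1 =>
                conv_rhs => rw [pvLoopA.eq_def]
                simp only [gt_iff_lt, hrev, if_pos hc, if_pos hab,
                  if_neg (by omega : ¬ 1 < PySem.Str.len t)]
                rw [pvLoopA_irrel (pvMu rest rb.reverse + 1) fA (fA + 1) rest rb.reverse
                  (offset - 4) (Nat.lt_succ_self _) (by omega) (by omega)]
        case neg =>
          cases rb with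
          | nil =>
            match fA with
            | 0 => exact absurd hfA (Nat.not_lt_zero _)
            | fA + 1 =>
              rw [pvTrim.eq_def, pvLoopA.eq_def]
              simp only [List.reverse_nil, gt_iff_lt, if_pos hc, if_neg hab, List.getLast?_nil]
          | cons t rest =>
            have htb : (t :: rest).reverse = rest.reverse ++ [t] := by simp
            rw [htb] at hmu hfA hfB
            have hg : (rest.reverse ++ [t]).getLast? = some t := List.getLast?_concat
            have hsumtb : pvLenSum (t :: rest) = pvLenSum rest + PySem.Str.len t := by
              rw [pvLenSum_cons]; ring
            have hsumrev : pvLenSum (rest.reverse ++ [t]) = pvLenSum (t :: rest) := by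
              rw [pvLenSum_concat, pvLenSum_reverse, hsumtb]
            by_cases hk : (0:Int) < min (min (pvLenSum ta + pvLenSum (t :: rest) - (64 - offset))
                (pvLenSum (t :: rest) - pvLenSum ta + 1)) (PySem.Str.len t - 1)
            case pos =>
              rw [pvTrim.eq_def]
              simp only [gt_iff_lt, if_pos hc, if_neg hab, if_pos hk]
              set K := min (min (pvLenSum ta + pvLenSum (t :: rest) - (64 - offset))
                (pvLenSum (t :: rest) - pvLenSum ta + 1)) (PySem.Str.len t - 1) with hKdef
              have hK1 : K ≤ PySem.Str.len t - 1 := min_le_right _ _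
              have hK2 : K ≤ pvLenSum ta + pvLenSum (t :: rest) - (64 - offset) :=
                le_trans (min_le_left _ _) (min_le_left _ _)
              have hK3 : K ≤ pvLenSum (t :: rest) - pvLenSum ta + 1 :=
                le_trans (min_le_left _ _) (min_le_right _ _)
              have hlen' : PySem.Str.len (PySem.Str.slice t none (some (PySem.Str.len t - K)))
                  = PySem.Str.len t - K := pvStrLen_slice_to t _ (by omega) (by omega)
              have hsum : pvLenSum (PySem.Str.slice t none (some (PySem.Str.len t - K)) :: rest)
                  = pvLenSum (t :: rest) - K := by
                rw [pvLenSum_cons, hlen', hsumtb]; ring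
              have hrevnew : (PySem.Str.slice t none (some (PySem.Str.len t - K)) :: rest).reverse
                  = rest.reverse ++ [PySem.Str.slice t none (some (PySem.Str.len t - K))] := by simp
              have hKn : ((K.toNat : Nat) : Int) = K := Int.toNat_of_nonneg hk.le
              have hdec : pvMu ta (PySem.Str.slice t none (some (PySem.Str.len t - K)) :: rest).reverse
                  < pvMu ta (rest.reverse ++ [t]) := by
                rw [hrevnew]
                have hlt := pvMu_last_lt (PySem.Str.slice t none (some (PySem.Str.len t - K))) t
                  ta (rest.reverse ++ [t]) hg
                  (by rw [pvToList_slice_to t _ (by omega), List.length_take]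
                      have := pvStrLen_eq t
                      omega)
                rwa [List.dropLast_concat] at hlt
              rw [ih fA fB ta (PySem.Str.slice t none (some (PySem.Str.len t - K)) :: rest)
                _ _ _ offset (by omega) (by omega) (by omega) rfl hsum.symm rfl]
              have hB := pvLoopA_bulk_b K.toNat fA ta (rest.reverse ++ [t]) t offset
                (by omega) hg (by omega) (by rw [hKn]; omega)
                (by rw [hKn, hsumrev]; omega) (by rw [hKn, hsumrev]; omega)
              rw [List.dropLast_concat, hKn] at hB
              rw [htb, hrevnew, ← hB]
            case neg =>
              have h1 : (1:Int) ≤ min (pvLenSum ta + pvLenSum (t :: rest) - (64 - offset))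
                  (pvLenSum (t :: rest) - pvLenSum ta + 1) := le_min (by omega) (by omega)
              have hlen1 : PySem.Str.len t ≤ 1 := by
                by_contra hgt
                exact hk (lt_of_lt_of_le Int.zero_lt_one (le_min h1 (by omega)))
              rw [pvTrim.eq_def]
              simp only [gt_iff_lt, if_pos hc, if_neg hab, if_neg hk]
              have hdec : pvMu ta rest.reverse < pvMu ta (rest.reverse ++ [t]) := by
                have hlt := pvMu_dropLast_lt ta (rest.reverse ++ [t]) t hg
                rwa [List.dropLast_concat] at hlt
              rw [ih fA fB ta rest _ _ _ (offset - 4) (by omega) (by omega) (by omega)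
                rfl (by rw [hsumtb]; ring) (by ring)]
              match fA with
              | 0 => exact absurd hfA (Nat.not_lt_zero _)
              | fA + 1 =>
                conv_rhs => rw [pvLoopA.eq_def]
                rw [htb]
                simp only [gt_iff_lt, hsumrev, if_pos hc, if_neg hab, hg,
                  if_neg (by omega : ¬ 1 < PySem.Str.len t), List.dropLast_concat]
                rw [pvLoopA_irrel (pvMu ta rest.reverse + 1) fA (fA + 1) ta rest.reverse
                  (offset - 4) (Nat.lt_succ_self _) (by omega) (by omega)]

theorem pvCharSum_append (xs ys : List String) :
    pvCharSum (xs ++ ys) = pvCharSum xs + pvCharSum ys := by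
  simp [pvCharSum]

-- foldl-append over a list equals map
theorem pvFoldl_append_eq_map {α β : Type} (l : List α) (f : α → β) :
    l.foldl (fun r x => r ++ [f x]) [] = l.map f := by
  have h : ∀ (acc : List β), l.foldl (fun r x => r ++ [f x]) acc = acc ++ l.map f := by
    induction l with
    | nil => intro acc; simp
    | cons x l ih => intro acc; rw [List.foldl_cons, ih, List.map_cons]; simp
  simpa using h []

-- per-answer element: B's one_sample equals A's per-element computation
theorem pvElem_eq (texts cands : List String) (i : Nat) (a : Int) :
    (let texts_a := PySem.List.slice texts none (some ((i : Int) + 1));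
     let texts_b := PySem.List.slice texts (some ((i : Int) + 1)) none;
     let offset : Int := 3 + 4 + 1 + 4 * ((texts_a.length : Int) + (texts_b.length : Int) - 2);
     let p := pvLoopA (pvMu texts_a texts_b + 1) texts_a texts_b offset;
     (p.1, p.2, a, cands))
    = pvOneSample texts i a cands := by
  have hcast : ((i : Int) + 1) = (((i + 1 : Nat)) : Int) := by push_cast; ring
  have hsa : PySem.List.slice texts none (some ((i : Int) + 1)) = texts.take (i + 1) := by
    rw [hcast, PySem.List.slice_to_natCast]
  have hsb : PySem.List.slice texts (some ((i : Int) + 1)) none = texts.drop (i + 1) := by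
    rw [hcast, PySem.List.slice_from_natCast]
  simp only [hsa, hsb, pvOneSample]
  have hrevrev : ((texts.drop (i + 1)).reverse).reverse = texts.drop (i + 1) :=
    List.reverse_reverse _
  have hlen : (texts.take (i + 1)).length + (texts.drop (i + 1)).length = texts.length := by
    rw [List.length_take, List.length_drop]; omega
  have hoff : (64 : Int) - 4 * (texts.length : Int)
      = 64 - (3 + 4 + 1 + 4 * (((texts.take (i + 1)).length : Int)
        + ((texts.drop (i + 1)).length : Int) - 2)) := by
    push_cast [← hlen]; ring
  have hmu : pvMu (texts.take (i + 1)) ((texts.drop (i + 1)).reverse).reverse < pvFuel texts := by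
    rw [hrevrev]
    have h1 : pvCharSum (texts.take (i + 1)) + pvCharSum (texts.drop (i + 1)) = pvCharSum texts := by
      rw [← pvCharSum_append, List.take_append_drop]
    simp only [pvMu, pvFuel]
    omega
  rw [pvTrim_eq_aux (pvFuel texts) (pvMu (texts.take (i + 1)) (texts.drop (i + 1)) + 1)
    (pvFuel texts) (texts.take (i + 1)) ((texts.drop (i + 1)).reverse)
    _ _ _ _ (by rw [hrevrev] at hmu ⊢; exact hmu)
    (by rw [hrevrev]; exact Nat.lt_succ_self _) (by rw [hrevrev] at hmu ⊢; exact hmu)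
    (pvSumLen_eq _) (by rw [pvSumLen_eq, pvLenSum_reverse]) hoff]
  rw [hrevrev]
  simp [List.reverse_reverse]

-- ===== VERDICT (by name: the statement is the Claim_ definition above) =====
theorem sample_split_spec : Claim_equal_sample_split := by
  intro texts answers candidates _ _
  unfold Spec_sample_split sample_split sample_split_alt
  rw [pvFoldl_append_eq_map]
  rw [PySem.List.enumerate_eq_zipIdx_map]
  rw [List.map_map]
  apply List.map_congr_left
  intro ai _
  simpa using pvElem_eq texts candidates ai.2 ai.1
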